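-- pv_equiv track=rewrite | github.com/larry-k88/PY110 | small_problems/easy_5/_09_staggered_case_2.py | staggered_case
-- ===== SOURCE A (Python) =====
-- def staggered_case(string): # mine
--     result = ''
--     upper_char = True
--     for char in string:
--         if char.isalpha():
--             result += char.upper() if upper_char else char.casefold()
--             upper_char = not upper_char
--
--         elif not char.isalpha():
--             result += char
--
--     return result
-- ===== SOURCE B (Python) =====
-- def staggered_case(string):
--     letters = [c for c in string if c.isalpha()]
--     cased = [c.upper() if i % 2 == 0 else c.casefold()
--              for i, c in enumerate(letters)]
--     it = iter(cased)
--     return ''.join(next(it) if c.isalpha() else c for c in string)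
-- ===== Notes on version B (the rewrite author's own statement) =====
-- stated objective: alternative
-- what changed: Replaces the single stateful toggle-scan with a build-then-reassemble decomposition: filter out the letters, case them by index parity in one table, then splice the cased letters back into the original string in a second pass.
import Mathlib
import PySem

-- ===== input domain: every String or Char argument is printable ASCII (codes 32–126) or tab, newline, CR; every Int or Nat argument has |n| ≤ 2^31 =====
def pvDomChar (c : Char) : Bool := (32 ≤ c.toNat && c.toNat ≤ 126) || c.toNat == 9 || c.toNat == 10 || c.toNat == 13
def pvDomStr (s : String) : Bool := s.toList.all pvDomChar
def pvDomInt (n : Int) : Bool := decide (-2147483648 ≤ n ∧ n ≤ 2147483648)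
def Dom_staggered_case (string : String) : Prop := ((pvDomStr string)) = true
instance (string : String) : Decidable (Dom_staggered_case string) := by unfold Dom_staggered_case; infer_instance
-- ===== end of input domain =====

-- B replaces A's stateful toggle-scan with a build-then-reassemble decomposition
-- (filter letters, case them by index parity, splice back); alternative, not faster.
-- char.casefold() is ported as PySem.Chars.lowerChar, exact on the ASCII domain.

-- ===== PORT A =====
-- the loop body of A: on a letter, append it cased by the flag and toggle the flag;
-- otherwise (elif not char.isalpha()) append the char unchanged
def pvStepA (st : List Char × Bool) (char : Char) : List Char × Bool :=
  if PySem.Chars.isalpha char then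
    (st.1 ++ [if st.2 then PySem.Chars.upperChar char else PySem.Chars.lowerChar char], !st.2)
  else if !(PySem.Chars.isalpha char) then
    (st.1 ++ [char], st.2)
  else st

def staggered_case (string : String) : String :=
  String.mk (string.toList.foldl pvStepA ([], true)).1

-- ===== PORT B =====
-- second pass of B: emit the next cased letter for a letter, the char itself otherwise
-- (the [] branch of the match is unreachable: the iterator holds one cased letter per letter)
def pvSplice : List Char → List Char → List Char
  | [], _ => []
  | c :: cs, q =>
    if PySem.Chars.isalpha c then
      match q with
      | x :: q' => x :: pvSplice cs q'
      | [] => c :: pvSplice cs []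
    else c :: pvSplice cs q

def staggered_case_alt (string : String) : String :=
  let letters := string.toList.filter PySem.Chars.isalpha
  let cased := letters.mapIdx (fun i c =>
    if i % 2 == 0 then PySem.Chars.upperChar c else PySem.Chars.lowerChar c)
  String.mk (pvSplice string.toList cased)

-- ===== PRECONDITION & SPEC =====
def Spec_staggered_case (string : String) (out : String) : Prop := out = staggered_case_alt string
instance (string : String) (out : String) : Decidable (Spec_staggered_case string out) := by unfold Spec_staggered_case; infer_instance

-- ===== CLAIM (what is proved, stated in full; the proofs are below) =====
def Claim_equal_staggered_case : Prop := ∀ (string : String), Dom_staggered_case string → Spec_staggered_case string (staggered_case string)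

-- ===== LEMMAS AND PROOFS =====

-- the sequence of cased letters, starting with flag b, as A's toggle produces it
def pvCaseFrom (b : Bool) : List Char → List Char
  | [] => []
  | c :: cs =>
    (if b then PySem.Chars.upperChar c else PySem.Chars.lowerChar c) :: pvCaseFrom (!b) cs

theorem pvMapIdx_caseFrom (cs : List Char) (k : Nat) :
    cs.mapIdx (fun i c =>
      if (i + k) % 2 == 0 then PySem.Chars.upperChar c else PySem.Chars.lowerChar c)
      = pvCaseFrom ((k % 2 == 0)) cs := by
  induction cs generalizing k with
  | nil => simp [pvCaseFrom]
  | cons c cs ih =>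
    simp only [List.mapIdx_cons, pvCaseFrom, Nat.zero_add]
    congr 1
    · have := ih (k + 1)
      simp only [show ∀ i, i + 1 + k = i + (k + 1) by omega] at *
      rw [this]
      rcases Nat.even_or_odd k with h | h
      · rw [Nat.even_iff] at h
        have : (k + 1) % 2 = 1 := by omega
        simp [h, this]
      · rw [Nat.odd_iff] at h
        have : (k + 1) % 2 = 0 := by omega
        simp [h, this]

theorem pvLoopA (cs : List Char) (acc : List Char) (b : Bool) :
    (cs.foldl pvStepA (acc, b)).1
      = acc ++ pvSplice cs (pvCaseFrom b (cs.filter PySem.Chars.isalpha)) := by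
  induction cs generalizing acc b with
  | nil => simp [pvSplice]
  | cons c cs ih =>
    by_cases h : PySem.Chars.isalpha c = true
    · simp [pvStepA, h, pvSplice, pvCaseFrom, ih, List.append_assoc]
    · simp [pvStepA, h, pvSplice, ih]

-- ===== VERDICT (by name: the statement is the Claim_ definition above) =====
theorem staggered_case_spec : Claim_equal_staggered_case := by
  intro s _
  unfold Spec_staggered_case staggered_case staggered_case_alt
  rw [pvLoopA, List.nil_append]
  have h := pvMapIdx_caseFrom (s.toList.filter PySem.Chars.isalpha) 0
  simp only [Nat.add_zero] at h
  simp only [h]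
  rfl
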